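-- pv_equiv track=rewrite | github.com/iasomura/nextstep2026 | phishing_agent/rules/data/patterns.py | count_rare_bigrams
-- ===== SOURCE A (Python) =====
-- RARE_BIGRAMS: frozenset = frozenset([
--     "qx", "qz", "zx", "xz", "jq", "qj", "vx", "xv",
--     "zq", "qk", "kq", "fq", "qf", "jx", "xj", "vq",
--     "wq", "qw", "zj", "jz", "xq", "qv", "bx", "xb",
--     "hx", "xh", "kx", "xk", "wx", "xw", "zv", "vz",
--     "fz", "zf", "pq", "qp", "mq", "qm", "nq", "qn",
--     "cq", "qc", "dq", "qd", "gq", "qg", "hq", "qh",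
--     "jv", "vj", "kv", "vk", "wv", "vw", "zw", "wz",
--     "bq", "qb", "sz", "zs", "tz", "zt",
-- ])
--
-- def count_rare_bigrams(text: str) -> int:
--     """Count rare bigrams in text."""
--     text_lower = text.lower()
--     count = 0
--     for i in range(len(text_lower) - 1):
--         bigram = text_lower[i:i+2]
--         if bigram in RARE_BIGRAMS:
--             count += 1
--     return count
-- ===== SOURCE B (Python) =====
-- RARE_PAIRS: frozenset = frozenset([
--     ("q", "x"), ("q", "z"), ("z", "x"), ("x", "z"),
--     ("j", "q"), ("q", "j"), ("v", "x"), ("x", "v"),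
--     ("z", "q"), ("q", "k"), ("k", "q"), ("f", "q"),
--     ("q", "f"), ("j", "x"), ("x", "j"), ("v", "q"),
--     ("w", "q"), ("q", "w"), ("z", "j"), ("j", "z"),
--     ("x", "q"), ("q", "v"), ("b", "x"), ("x", "b"),
--     ("h", "x"), ("x", "h"), ("k", "x"), ("x", "k"),
--     ("w", "x"), ("x", "w"), ("z", "v"), ("v", "z"),
--     ("f", "z"), ("z", "f"), ("p", "q"), ("q", "p"),
--     ("m", "q"), ("q", "m"), ("n", "q"), ("q", "n"),
--     ("c", "q"), ("q", "c"), ("d", "q"), ("q", "d"),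
--     ("g", "q"), ("q", "g"), ("h", "q"), ("q", "h"),
--     ("j", "v"), ("v", "j"), ("k", "v"), ("v", "k"),
--     ("w", "v"), ("v", "w"), ("z", "w"), ("w", "z"),
--     ("b", "q"), ("q", "b"), ("s", "z"), ("z", "s"),
--     ("t", "z"), ("z", "t"),
-- ])
--
--
-- def count_rare_bigrams(text: str) -> int:
--     """Count rare bigrams in text."""
--     t = text.lower()
--     return sum(t.count(a + b) for a, b in RARE_PAIRS)
-- ===== Notes on version B (the rewrite author's own statement) =====
-- stated objective: faster
-- what changed: A makes one positional left-to-right Python-level pass slicing each adjacent bigram and testing set membership; B instead iterates over the 62 rare character pairs and sums str.count of each two-char pattern over the lowered text (exact because every rare bigram has two distinct characters, so non-overlapping counting equals positional counting), moving the inner scan into C's str.count.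
import Mathlib
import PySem

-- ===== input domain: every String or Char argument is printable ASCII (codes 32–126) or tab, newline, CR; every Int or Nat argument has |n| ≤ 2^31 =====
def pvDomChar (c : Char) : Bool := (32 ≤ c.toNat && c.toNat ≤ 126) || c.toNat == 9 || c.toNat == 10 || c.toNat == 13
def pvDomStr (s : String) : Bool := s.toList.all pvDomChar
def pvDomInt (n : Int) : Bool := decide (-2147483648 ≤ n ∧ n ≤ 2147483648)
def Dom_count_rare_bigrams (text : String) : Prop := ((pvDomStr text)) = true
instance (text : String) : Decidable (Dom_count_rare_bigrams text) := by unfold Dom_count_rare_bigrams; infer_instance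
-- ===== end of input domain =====

-- B replaces A's positional scan (slice each adjacent bigram, test set membership) by a sum over the
-- 62 rare character pairs of the non-overlapping substring count of each two-char pattern (measured faster: the scans run inside str.count; return value only).

-- ===== PORT A =====
-- A's module constant RARE_BIGRAMS (a frozenset of two-char strings)
def rareBigrams : PySem.Set String := PySem.Set.ofList [
    "qx", "qz", "zx", "xz", "jq", "qj", "vx", "xv",
    "zq", "qk", "kq", "fq", "qf", "jx", "xj", "vq",
    "wq", "qw", "zj", "jz", "xq", "qv", "bx", "xb",
    "hx", "xh", "kx", "xk", "wx", "xw", "zv", "vz",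
    "fz", "zf", "pq", "qp", "mq", "qm", "nq", "qn",
    "cq", "qc", "dq", "qd", "gq", "qg", "hq", "qh",
    "jv", "vj", "kv", "vk", "wv", "vw", "zw", "wz",
    "bq", "qb", "sz", "zs", "tz", "zt"]

def count_rare_bigrams (text : String) : Int :=
  let text_lower := PySem.Str.lower text
  (PySem.List.pyRange 0 (PySem.Str.len text_lower - 1) 1).foldl
    (fun count i =>
      let bigram := PySem.Str.slice text_lower (some i) (some (i + 2))
      if rareBigrams.contains bigram then count + 1 else count) 0

-- ===== PORT B =====
-- Source B's module constant RARE_PAIRS (a frozenset of pairs of one-char strings, modelled as Char × Char)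
def rarePairsB : PySem.Set (Char × Char) := PySem.Set.ofList [
    ('q','x'), ('q','z'), ('z','x'), ('x','z'), ('j','q'), ('q','j'), ('v','x'), ('x','v'),
    ('z','q'), ('q','k'), ('k','q'), ('f','q'), ('q','f'), ('j','x'), ('x','j'), ('v','q'),
    ('w','q'), ('q','w'), ('z','j'), ('j','z'), ('x','q'), ('q','v'), ('b','x'), ('x','b'),
    ('h','x'), ('x','h'), ('k','x'), ('x','k'), ('w','x'), ('x','w'), ('z','v'), ('v','z'),
    ('f','z'), ('z','f'), ('p','q'), ('q','p'), ('m','q'), ('q','m'), ('n','q'), ('q','n'),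
    ('c','q'), ('q','c'), ('d','q'), ('q','d'), ('g','q'), ('q','g'), ('h','q'), ('q','h'),
    ('j','v'), ('v','j'), ('k','v'), ('v','k'), ('w','v'), ('v','w'), ('z','w'), ('w','z'),
    ('b','q'), ('q','b'), ('s','z'), ('z','s'), ('t','z'), ('z','t')]

-- 'a + b' concatenating two one-char strings is exactly String.ofList [a, b]
def count_rare_bigrams_alt (text : String) : Int :=
  let t := PySem.Str.lower text
  rarePairsB.foldl
    (fun total p => total + (PySem.Str.count t (String.ofList [p.1, p.2]) : Int)) 0

-- ===== PRECONDITION & SPEC =====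
def Spec_count_rare_bigrams (text : String) (out : Int) : Prop := out = count_rare_bigrams_alt text
instance (text : String) (out : Int) : Decidable (Spec_count_rare_bigrams text out) := by unfold Spec_count_rare_bigrams; infer_instance

-- ===== CLAIM (what is proved, stated in full; the proofs are below) =====
def Claim_equal_count_rare_bigrams : Prop := ∀ (text : String), Dom_count_rare_bigrams text → Spec_count_rare_bigrams text (count_rare_bigrams text)

-- ===== LEMMAS AND PROOFS =====

set_option maxRecDepth 10000 in
lemma rareBigrams_eq : rareBigrams = rarePairsB.map (fun p => String.ofList [p.1, p.2]) := by decide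

set_option maxRecDepth 10000 in
lemma rarePairsB_nodup : List.Nodup (rarePairsB : List (Char × Char)) := by decide

set_option maxRecDepth 10000 in
lemma rarePairsB_ne : ∀ p ∈ (rarePairsB : List (Char × Char)), p.1 ≠ p.2 := by decide

lemma pair_string_inj : Function.Injective (fun q : Char × Char => String.ofList [q.1, q.2]) := by
  intro x y h
  have := congrArg String.toList h
  simp at this
  exact Prod.ext this.1 this.2

lemma contains_glue (p : Char × Char) :
    rareBigrams.contains (String.ofList [p.1, p.2]) = (rarePairsB : List (Char × Char)).contains p := by
  rw [rareBigrams_eq]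
  simp [List.mem_map_of_injective pair_string_inj]

-- non-overlapping count of a two-distinct-char pattern = number of adjacent pairs equal to it
lemma pairs_head_ne {a b : Char} (hba : b ≠ a) (u : List Char) :
    (u.zip u.tail).countP (· == (a,b)) = ((b::u).zip u).countP (· == (a,b)) := by
  cases u with
  | nil => simp
  | cons d w => simp [Prod.ext_iff, hba]

lemma go_count (a b : Char) (hab : a ≠ b) :
    ∀ (fuel : ℕ) (l : List Char) (acc : ℕ), l.length ≤ fuel →
      PySem.Chars.count.go [a,b] fuel l acc = acc + (l.zip l.tail).countP (· == (a,b))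
  | 0, l, acc, h => by
      rw [List.length_eq_zero_iff.mp (Nat.le_zero.mp h)]
      simp [PySem.Chars.count.go]
  | fuel+1, [], acc, h => by simp [PySem.Chars.count.go]
  | fuel+1, c :: t, acc, h => by
      rw [PySem.Chars.count.go]
      by_cases hp : ([a,b].isPrefixOf (c::t) : Bool)
      · obtain ⟨s, hs⟩ := List.isPrefixOf_iff_prefix.mp hp
        simp only [List.cons_append, List.nil_append, List.cons.injEq] at hs
        obtain ⟨rfl, rfl⟩ := hs
        simp only [hp, if_true, List.length_cons] at h ⊢
        have hdrop : List.drop (([] : List Char).length + 1 + 1) (a :: b :: s) = s := by simp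
        rw [show (List.drop ([].length + 1 + 1) (a :: b :: s)) = s from hdrop,
          go_count a b hab fuel s (acc+1) (by omega)]
        rw [pairs_head_ne (Ne.symm hab) s]
        simp
        omega
      · simp only [hp, if_false, Bool.false_eq_true]
        rw [go_count a b hab fuel t acc (by simpa using Nat.le_of_succ_le_succ h)]
        cases t with
        | nil => simp
        | cons d w =>
          have hne : ¬ (c = a ∧ d = b) := by
            intro ⟨h1, h2⟩; subst h1; subst h2
            simp [List.isPrefixOf] at hp
          simp [Prod.ext_iff, hne]

lemma count_pairs (a b : Char) (hab : a ≠ b) (l : List Char) :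
    PySem.Chars.count l [a,b] = (l.zip l.tail).countP (· == (a,b)) := by
  rw [PySem.Chars.count]
  simpa using go_count a b hab l.length l 0 le_rfl

-- A's positional scan = count over the list of adjacent pairs
lemma range_pairs (Q : List Char → Bool) :
    ∀ l : List Char,
      (List.range (l.length - 1)).countP (fun k => Q ((l.drop k).take 2)) =
        (l.zip l.tail).countP (fun p => Q [p.1, p.2])
  | [] => by simp
  | [c] => by simp
  | c :: d :: u => by
      have h1 : (c :: d :: u).length - 1 = (d :: u).length - 1 + 1 := by simp
      rw [h1, List.range_succ_eq_map, List.countP_cons, List.countP_map]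
      have ih := range_pairs Q (d :: u)
      have h2 : List.take 2 (List.drop 0 (c :: d :: u)) = [c, d] := rfl
      simp only [List.tail_cons, List.zip_cons_cons, List.countP_cons, Function.comp_def,
        Nat.succ_eq_add_one, List.drop_succ_cons, h2] at *
      omega

-- B's per-pattern sum = one count with a membership predicate (S without duplicates)
lemma countP_contains_cons (ps : List (Char × Char)) (q : Char × Char) (S : List (Char × Char))
    (hq : q ∉ S) :
    ps.countP (fun p => (q :: S).contains p) = ps.countP (· == q) + ps.countP (fun p => S.contains p) := by
  induction ps with
  | nil => simp
  | cons p ps ih =>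
      simp only [List.countP_cons, ih]
      by_cases hpq : p = q
      · subst hpq
        simp [hq]
        omega
      · simp [hpq]
        omega

lemma sum_countP_nodup (ps : List (Char × Char)) :
    ∀ S : List (Char × Char), S.Nodup →
      (S.map (fun q => ps.countP (· == q))).sum = ps.countP (fun p => S.contains p)
  | [], _ => by simp
  | q :: S, h => by
      rw [List.map_cons, List.sum_cons, sum_countP_nodup ps S (List.Nodup.of_cons h),
        countP_contains_cons ps q S (by simp at h; exact h.1)]

lemma slice_two (xs : List Char) (k : ℕ) :
    PySem.List.slice xs (some (k:Int)) (some ((k:Int)+2)) = (xs.drop k).take 2 := by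
  have h2 : ((k:Int)+2) = ((k+2:ℕ):Int) := by push_cast; ring
  rw [h2, PySem.List.slice_natCast]
  simp

lemma pyRange_pred (n : ℕ) :
    PySem.List.pyRange 0 ((n:Int) - 1) 1 = (List.range (n-1)).map (fun k : ℕ => (k:Int)) := by
  cases n with
  | zero => rfl
  | succ m =>
      have h : ((m+1:ℕ):Int) - 1 = ((m:ℕ):Int) := by push_cast; ring
      rw [h, PySem.List.pyRange_zero_natCast]
      norm_num

-- ===== VERDICT (by name: the statement is the Claim_ definition above) =====
set_option maxRecDepth 40000 in
theorem count_rare_bigrams_spec : Claim_equal_count_rare_bigrams := by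
  intro text _
  unfold Spec_count_rare_bigrams count_rare_bigrams count_rare_bigrams_alt
  dsimp only
  set s := PySem.Str.lower text with hs
  set l := s.toList with hl
  -- A side
  rw [PySem.Str.len_eq, ← hl, pyRange_pred l.length,
    PySem.List.foldl_if_add_one (fun i : Int => rareBigrams.contains
      (PySem.Str.slice s (some i) (some (i + 2)))) ((List.range (l.length - 1)).map (fun k : ℕ => (k:Int))) 0,
    List.countP_map]
  have hA : ∀ k : ℕ, PySem.Str.slice s (some (k:Int)) (some ((k:Int)+2))
      = String.ofList ((l.drop k).take 2) := by
    intro k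
    rw [PySem.Str.slice]
    simp only [PySem.Chars.slice_eq_listSlice, ← hl, slice_two]
  simp only [Function.comp_def]
  simp only [hA]
  rw [range_pairs (fun t => rareBigrams.contains (String.ofList t)) l]
  simp only [contains_glue]
  -- B side
  rw [PySem.List.foldl_add rarePairsB
    (fun p : Char × Char => (PySem.Str.count s (String.ofList [p.1, p.2]) : Int)) 0]
  have hB : ∀ p : Char × Char, p ∈ (rarePairsB : List (Char × Char)) →
      (fun p : Char × Char => (PySem.Str.count s (String.ofList [p.1, p.2]) : Int)) p
        = ((l.zip l.tail).countP (· == p) : Int) := by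
    intro p hp
    simp only [PySem.Str.count, String.toList_ofList, ← hl]
    rw [count_pairs p.1 p.2 (rarePairsB_ne p hp) l]
  rw [List.map_congr_left hB]
  have hcast : ((rarePairsB : List (Char × Char)).map (fun p => (((l.zip l.tail).countP (· == p) : ℕ) : Int))).sum
      = ((((rarePairsB : List (Char × Char)).map (fun p => (l.zip l.tail).countP (· == p))).sum : ℕ) : Int) := by
    push_cast [Nat.cast_list_sum]
    rw [List.map_map]
    rfl
  rw [hcast, sum_countP_nodup (l.zip l.tail) rarePairsB rarePairsB_nodup]
  rfl
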